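-- pv_equiv track=rewrite | github.com/tomdif/jt-gravity-from-convex-subsets | scripts/01_bd_partition_function.py | interval_count
-- ===== SOURCE A (Python) =====
-- from collections import defaultdict
--
-- def interval_count(S, m):
--     """Count k-element order intervals within S for k=2,3,..."""
--     counts = defaultdict(int)
--     S_list = sorted(S)
--     for a in S_list:
--         for b in S_list:
--             if a[0] <= b[0] and a[1] <= b[1] and a != b:
--                 # Count elements in [a,b] ∩ S
--                 interval = [c for c in S if a[0]<=c[0]<=b[0] and a[1]<=c[1]<=b[1]]
--                 k = len(interval)
--                 if k >= 2:
--                     counts[k] += 1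
--     return counts
-- ===== SOURCE B (Python) =====
-- from collections import Counter
--
-- def interval_count(S, m):
--     """Count k-element order intervals within S for k=2,3,..."""
--     xs = sorted(set(x for x, y in S))
--     ys = sorted(set(y for x, y in S))
--     xi = {x: i for i, x in enumerate(xs)}
--     yi = {y: j for j, y in enumerate(ys)}
--     C = Counter(S)
--     # P[i][j] = number of points of S (with multiplicity) with x <= xs[i-1] and y <= ys[j-1]
--     prev = [0] * (len(ys) + 1)
--     P = [prev]
--     for x in xs:
--         row = [0]
--         run = 0
--         for j, y in enumerate(ys):
--             run += C[(x, y)]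
--             row.append(prev[j + 1] + run)
--         P.append(row)
--         prev = row
--     counts = {}
--     S_list = sorted(S)
--     for a in S_list:
--         ia, ja = xi[a[0]], yi[a[1]]
--         for b in S_list:
--             if a[0] <= b[0] and a[1] <= b[1] and a != b:
--                 ib, jb = xi[b[0]] + 1, yi[b[1]] + 1
--                 k = P[ib][jb] - P[ia][jb] - P[ib][ja] + P[ia][ja]
--                 if k >= 2:
--                     counts[k] = counts.get(k, 0) + 1
--     return counts
-- ===== Notes on version B (the rewrite author's own statement) =====
-- stated objective: faster
-- what changed: The inner O(n) scan that recounts the box for every dominance pair is replaced by a coordinate-compressed 2D prefix-sum grid built once, so each pair's box count is an O(1) inclusion-exclusion lookup.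
import Mathlib
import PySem

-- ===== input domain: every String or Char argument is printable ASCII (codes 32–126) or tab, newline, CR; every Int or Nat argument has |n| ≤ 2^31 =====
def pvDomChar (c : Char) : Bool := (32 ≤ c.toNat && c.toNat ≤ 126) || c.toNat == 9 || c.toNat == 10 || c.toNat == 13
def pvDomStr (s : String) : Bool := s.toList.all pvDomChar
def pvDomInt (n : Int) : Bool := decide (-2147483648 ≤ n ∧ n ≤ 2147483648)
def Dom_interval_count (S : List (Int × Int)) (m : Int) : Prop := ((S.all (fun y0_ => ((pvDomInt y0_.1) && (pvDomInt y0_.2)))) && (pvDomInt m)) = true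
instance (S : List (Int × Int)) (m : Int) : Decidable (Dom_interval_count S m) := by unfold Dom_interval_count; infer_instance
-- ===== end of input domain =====

-- B replaces A's inner per-pair box-recount scan by a coordinate-compressed 2D prefix-sum
-- grid built once, with inclusion-exclusion lookups per pair (objective: faster).

-- ===== PORT A =====
def interval_count (S : List (Int × Int)) (m : Int) : List (Int × Int) :=
  let S_list := PySem.List.sorted2 S Prod.fst Prod.snd false
  let counts : PySem.Dict Int Int := S_list.foldl (fun counts a =>
    S_list.foldl (fun counts b =>
      if a.1 ≤ b.1 ∧ a.2 ≤ b.2 ∧ a ≠ b then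
        let interval := S.filter (fun c => decide (a.1 ≤ c.1 ∧ c.1 ≤ b.1 ∧ a.2 ≤ c.2 ∧ c.2 ≤ b.2))
        let k : Int := interval.length
        if k ≥ 2 then counts.modify k 0 (· + 1) else counts
      else counts) counts) PySem.Dict.empty
  counts.items

-- ===== PORT B =====
-- helpers mirror Source B's locals: xs/ys (sorted distinct coordinates), the index dicts
-- xi/yi, one prefix-sum row, and the prefix-sum table P
def bXs (S : List (Int × Int)) : List Int :=
  PySem.List.sorted (PySem.Set.ofList (S.map Prod.fst)) (fun x => x) false
def bYs (S : List (Int × Int)) : List Int :=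
  PySem.List.sorted (PySem.Set.ofList (S.map Prod.snd)) (fun y => y) false
def bIdx (xs : List Int) : PySem.Dict Int Int :=
  (PySem.List.enumerate xs 0).foldl (fun d p => d.insert p.2 p.1) PySem.Dict.empty
def bRow (C : PySem.Dict (Int × Int) Int) (ys : List Int) (prev : List Int) (x : Int) :
    List Int × Int :=
  (PySem.List.enumerate ys 0).foldl (fun rr p =>
    let run := rr.2 + C.getD (x, p.2) 0
    (rr.1 ++ [PySem.List.pyGetD prev (p.1 + 1) 0 + run], run)) ([0], 0)
def bGrid (S : List (Int × Int)) : List (List Int) :=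
  let ys := bYs S
  let C := PySem.Dict.counter S
  let prev0 : List Int := List.replicate (ys.length + 1) 0
  ((bXs S).foldl (fun st x =>
    let row := (bRow C ys st.2 x).1
    (st.1 ++ [row], row)) (([prev0] : List (List Int)), prev0)).1

def interval_count_alt (S : List (Int × Int)) (m : Int) : List (Int × Int) :=
  let xi := bIdx (bXs S)
  let yi := bIdx (bYs S)
  let P := bGrid S
  let S_list := PySem.List.sorted2 S Prod.fst Prod.snd false
  let counts : PySem.Dict Int Int := S_list.foldl (fun counts a =>
    let ia := xi.getD a.1 0
    let ja := yi.getD a.2 0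
    S_list.foldl (fun counts b =>
      if a.1 ≤ b.1 ∧ a.2 ≤ b.2 ∧ a ≠ b then
        let ib := xi.getD b.1 0 + 1
        let jb := yi.getD b.2 0 + 1
        let k := PySem.List.pyGetD (PySem.List.pyGetD P ib []) jb 0
               - PySem.List.pyGetD (PySem.List.pyGetD P ia []) jb 0
               - PySem.List.pyGetD (PySem.List.pyGetD P ib []) ja 0
               + PySem.List.pyGetD (PySem.List.pyGetD P ia []) ja 0
        if k ≥ 2 then counts.insert k (counts.getD k 0 + 1) else counts
      else counts) counts) PySem.Dict.empty
  counts.items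

-- ===== PRECONDITION & SPEC =====
def Spec_interval_count (S : List (Int × Int)) (m : Int) (out : List (Int × Int)) : Prop := out = interval_count_alt S m
instance (S : List (Int × Int)) (m : Int) (out : List (Int × Int)) : Decidable (Spec_interval_count S m out) := by unfold Spec_interval_count; infer_instance

-- ===== CLAIM (what is proved, stated in full; the proofs are below) =====
def Claim_equal_interval_count : Prop := ∀ (S : List (Int × Int)) (m : Int), Dom_interval_count S m → Spec_interval_count S m (interval_count S m)

-- ===== LEMMAS AND PROOFS =====

def cntG (S : List (Int × Int)) (X Y : List Int) : Int :=
  ((S.filter (fun c => decide (c.1 ∈ X) && decide (c.2 ∈ Y))).length : Int)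
def cntX (S : List (Int × Int)) (x : Int) (Y : List Int) : Int :=
  ((S.filter (fun c => decide (c.1 = x) && decide (c.2 ∈ Y))).length : Int)

theorem bXs_pairwise (S : List (Int × Int)) : (bXs S).Pairwise (· < ·) :=
  PySem.List.sorted_ofList_pairwise_lt _
theorem bYs_pairwise (S : List (Int × Int)) : (bYs S).Pairwise (· < ·) :=
  PySem.List.sorted_ofList_pairwise_lt _
theorem bXs_nodup (S : List (Int × Int)) : (bXs S).Nodup :=
  (bXs_pairwise S).imp ne_of_lt
theorem bYs_nodup (S : List (Int × Int)) : (bYs S).Nodup :=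
  (bYs_pairwise S).imp ne_of_lt
theorem mem_bXs (S : List (Int × Int)) (v : Int) : v ∈ bXs S ↔ v ∈ S.map Prod.fst := by
  simp [bXs, PySem.List.mem_sorted, PySem.Set.mem_ofList]
theorem mem_bYs (S : List (Int × Int)) (v : Int) : v ∈ bYs S ↔ v ∈ S.map Prod.snd := by
  simp [bYs, PySem.List.mem_sorted, PySem.Set.mem_ofList]

theorem cntX_cons (S : List (Int × Int)) (x y : Int) (L : List Int) (hy : y ∉ L) :
    cntX S x (y :: L) = (S.count (x, y) : Int) + cntX S x L := by
  induction S with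
  | nil => simp [cntX]
  | cons c t ih =>
    simp only [cntX, List.filter_cons, List.count_cons] at *
    by_cases h1 : c.1 = x
    · by_cases h2 : c.2 = y
      · have hc : c = (x, y) := Prod.ext h1 h2
        simp [hc, hy, List.mem_cons] at *
        omega
      · by_cases h3 : c.2 ∈ L <;>
          simp [h1, h2, h3, Prod.ext_iff, List.mem_cons] at * <;> omega
    · have hc : ¬ c = (x, y) := by simp [Prod.ext_iff, h1]
      simp [h1, hc] at *
      omega

theorem runTo_eq (S : List (Int × Int)) (x : Int) (L : List Int) (hL : L.Nodup) :
    (L.map (fun y => (PySem.Dict.counter S).getD (x, y) 0)).sum = cntX S x L := by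
  induction L with
  | nil => simp [cntX]
  | cons y L ih =>
    have hy : y ∉ L := (List.nodup_cons.mp hL).1
    rw [List.map_cons, List.sum_cons, ih (List.nodup_cons.mp hL).2,
      cntX_cons S x y L hy, PySem.Dict.getD_counter]

theorem cntG_nil_right (S : List (Int × Int)) (X : List Int) : cntG S X [] = 0 := by
  simp [cntG]
theorem cntG_nil_left (S : List (Int × Int)) (Y : List Int) : cntG S [] Y = 0 := by
  simp [cntG]

theorem cntG_append_X (S : List (Int × Int)) (X : List Int) (x : Int) (Y : List Int)
    (hx : x ∉ X) : cntG S (X ++ [x]) Y = cntG S X Y + cntX S x Y := by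
  induction S with
  | nil => simp [cntG, cntX]
  | cons c t ih =>
    simp only [cntG, cntX, ← List.countP_eq_length_filter, List.countP_cons,
      List.mem_append, List.mem_singleton, Bool.decide_or] at ih ⊢
    have hne : c.1 ∈ X → ¬ c.1 = x := fun h1 h => hx (h ▸ h1)
    by_cases h1 : c.1 ∈ X
    · have h3 : ¬ c.1 = x := hne h1
      by_cases h2 : c.2 ∈ Y <;> simp [h1, h2, h3] <;> omega
    · by_cases h3 : c.1 = x <;> by_cases h2 : c.2 ∈ Y
      all_goals simp [h1, h2, h3, hx] <;> omega

theorem bRow_spec (C : PySem.Dict (Int × Int) Int) (ys : List Int) (prev : List Int) (x : Int) :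
    bRow C ys prev x
      = (0 :: (List.range ys.length).map (fun (j : Nat) =>
            PySem.List.pyGetD prev ((j : Int) + 1) 0
              + ((ys.take (j + 1)).map (fun y => C.getD (x, y) 0)).sum),
         (ys.map (fun y => C.getD (x, y) 0)).sum) := by
  induction ys using List.reverseRecOn with
  | nil => rfl
  | append_singleton ys y ih =>
    simp only [bRow] at ih ⊢
    rw [PySem.List.enumerate_append, List.foldl_append, ih]
    simp only [PySem.List.enumerate, List.foldl_cons, List.foldl_nil]
    rw [List.length_append, List.length_singleton, List.range_succ, List.map_append]
    rw [Prod.mk.injEq]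
    constructor
    · rw [← List.cons_append]
      congr 1
      · congr 1
        apply List.map_congr_left
        intro j hj
        rw [List.mem_range] at hj
        rw [List.take_append_of_le_length (by omega)]
      · simp only [List.map_cons, List.map_nil]
        rw [List.take_of_length_le (by simp), List.map_append, List.sum_append]
        simp
    · rw [List.map_append, List.sum_append]
      simp

def eRow (S : List (Int × Int)) (X : List Int) : List Int :=
  0 :: (List.range (bYs S).length).map (fun (j : Nat) => cntG S X ((bYs S).take (j + 1)))

def gridF (S : List (Int × Int)) (X : List Int) : List (List Int) × List Int :=
  X.foldl (fun st x =>
    let row := (bRow (PySem.Dict.counter S) (bYs S) st.2 x).1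
    (st.1 ++ [row], row))
    (([List.replicate ((bYs S).length + 1) 0] : List (List Int)),
      List.replicate ((bYs S).length + 1) 0)

theorem eRow_nil (S : List (Int × Int)) : eRow S [] = List.replicate ((bYs S).length + 1) 0 := by
  simp [eRow, cntG_nil_left, List.replicate_succ]

theorem eRow_getD (S : List (Int × Int)) (X : List Int) (j : Nat) (hj : j ≤ (bYs S).length) :
    (eRow S X).getD j 0 = cntG S X ((bYs S).take j) := by
  cases j with
  | zero => simp [eRow, cntG_nil_right]
  | succ j =>
    simp only [eRow, List.getD_cons_succ]
    exact PySem.List.getD_map_range _ _ _ _ (by omega)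

theorem eRow_step (S : List (Int × Int)) (X : List Int) (x : Int) (hx : x ∉ X) :
    (bRow (PySem.Dict.counter S) (bYs S) (eRow S X) x).1 = eRow S (X ++ [x]) := by
  rw [bRow_spec]
  simp only [eRow]
  congr 1
  apply List.map_congr_left
  intro j hj
  rw [List.mem_range] at hj
  have h1 : ((j : Int) + 1) = ((j + 1 : Nat) : Int) := by push_cast; ring
  rw [h1, PySem.List.pyGetD_natCast]
  have h2 : (eRow S X).getD (j+1) 0 = cntG S X ((bYs S).take (j+1)) := eRow_getD S X (j+1) (by omega)
  simp only [eRow] at h2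
  rw [h2, runTo_eq S x _ ((List.take_sublist _ _).nodup (bYs_nodup S)),
    cntG_append_X S X x _ hx]

theorem gridF_spec (S : List (Int × Int)) (X : List Int) (hX : X.Nodup) :
    gridF S X = ((List.range (X.length + 1)).map (fun i => eRow S (X.take i)), eRow S X) := by
  induction X using List.reverseRecOn with
  | nil => simp [gridF, eRow_nil]
  | append_singleton X x ih =>
    have hX' : X.Nodup := hX.sublist (List.sublist_append_left _ _)
    have hx : x ∉ X := by
      intro h
      exact (List.disjoint_of_nodup_append hX) h (List.mem_singleton_self x)
    simp only [gridF] at ih ⊢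
    rw [List.foldl_append, ih hX']
    simp only [List.foldl_cons, List.foldl_nil, eRow_step S X x hx]
    have hr : List.range ((X ++ [x]).length + 1) = List.range (X.length + 1) ++ [X.length + 1] := by
      simp [List.range_succ]
    rw [Prod.mk.injEq]
    refine ⟨?_, rfl⟩
    rw [hr, List.map_append]
    congr 1
    · apply List.map_congr_left
      intro i hi
      rw [List.mem_range] at hi
      rw [List.take_append_of_le_length (by omega)]
    · simp only [List.map_cons, List.map_nil]
      rw [List.take_of_length_le (by simp)]


theorem bGrid_eq (S : List (Int × Int)) :
    bGrid S = (List.range ((bXs S).length + 1)).map (fun i => eRow S ((bXs S).take i)) := by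
  have h : bGrid S = (gridF S (bXs S)).1 := rfl
  rw [h, gridF_spec S (bXs S) (bXs_nodup S)]

theorem bGrid_get (S : List (Int × Int)) (i j : Nat)
    (hi : i ≤ (bXs S).length) (hj : j ≤ (bYs S).length) :
    PySem.List.pyGetD (PySem.List.pyGetD (bGrid S) (i : Int) []) (j : Int) 0
      = cntG S ((bXs S).take i) ((bYs S).take j) := by
  rw [bGrid_eq, PySem.List.pyGetD_natCast, PySem.List.pyGetD_natCast,
    PySem.List.getD_map_range _ _ _ _ (by omega)]
  exact eRow_getD S _ j hj

theorem bIdx_getD (xs : List Int) (h : xs.Nodup) (x : Int) (hx : x ∈ xs) :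
    (bIdx xs).getD x 0 = (xs.idxOf x : Int) := by
  have hitems : (bIdx xs).items = (PySem.List.enumerate xs 0).map (fun p => (p.2, p.1)) := by
    have := PySem.Dict.items_foldl_insert_fresh (l := PySem.List.enumerate xs 0)
      (k := fun p => p.2) (v := fun p => p.1) (d := PySem.Dict.empty)
      (by intro a _; exact PySem.Dict.contains_empty _)
      (by rw [PySem.List.map_snd_enumerate]; exact h)
    simpa using this
  have hkeys : (bIdx xs).keys.Nodup := by
    have : (bIdx xs).keys = xs := by
      show (bIdx xs).items.map (·.1) = xs
      rw [hitems, List.map_map]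
      have : ((fun p => p.1) ∘ (fun (p : Int × Int) => (p.2, p.1))) = fun (p : Int × Int) => p.2 := rfl
      rw [this, PySem.List.map_snd_enumerate]
    rw [this]; exact h
  have hk : xs.idxOf x < xs.length := List.idxOf_lt_length_of_mem hx
  have hmem : (x, (xs.idxOf x : Int)) ∈ (bIdx xs).items := by
    rw [hitems]
    refine List.mem_map.mpr ⟨((xs.idxOf x : Int), x), ?_, rfl⟩
    rw [PySem.List.mem_enumerate_iff]
    exact ⟨xs.idxOf x, hk, by simp⟩
  exact PySem.Dict.getD_of_mem_items _ hmem hkeys 0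

theorem mem_take_idxOf (xs : List Int) (hs : xs.Pairwise (· < ·)) (u v : Int)
    (hu : u ∈ xs) (hv : v ∈ xs) :
    (u ∈ xs.take (xs.idxOf v) ↔ u < v) ∧ (u ∈ xs.take (xs.idxOf v + 1) ↔ u ≤ v) := by
  induction xs with
  | nil => cases hu
  | cons w t ih =>
    have hw : ∀ z ∈ t, w < z := (List.pairwise_cons.mp hs).1
    have ht : t.Pairwise (· < ·) := (List.pairwise_cons.mp hs).2
    by_cases hvw : v = w
    · subst hvw
      rw [List.idxOf_cons_self]
      constructor
      · simp only [List.take_zero, List.not_mem_nil, false_iff]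
        rcases List.mem_cons.mp hu with h | h
        · omega
        · have := hw u h; omega
      · simp only [List.take_succ_cons, List.take_zero]
        constructor
        · intro h; rcases List.mem_cons.mp h with h | h
          · omega
          · cases h
        · intro h
          rcases List.mem_cons.mp hu with h2 | h2
          · simp [h2]
          · have := hw u h2; omega
    · have hvt : v ∈ t := (List.mem_cons.mp hv).resolve_left hvw
      have hlt : w < v := hw v hvt
      rw [List.idxOf_cons_ne _ (fun h => hvw h.symm)]
      by_cases huw : u = w
      · subst huw
        constructor
        · simp only [List.take_succ_cons, List.mem_cons, true_or, true_iff]; omega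
        · simp only [List.take_succ_cons, List.mem_cons, true_or, true_iff]; omega
      · have hut : u ∈ t := (List.mem_cons.mp hu).resolve_left huw
        have := ih ht hut hvt
        constructor
        · rw [List.take_succ_cons, List.mem_cons, or_iff_right huw]; exact this.1
        · rw [List.take_succ_cons, List.mem_cons, or_iff_right huw]; exact this.2

theorem inclExcl (l : List (Int × Int)) (P p Q q : Int → Bool)
    (hP : ∀ c ∈ l, p c.1 = true → P c.1 = true)
    (hQ : ∀ c ∈ l, q c.2 = true → Q c.2 = true) :
    ((l.filter (fun c => (P c.1 && !p c.1) && (Q c.2 && !q c.2))).length : Int)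
      = ((l.filter (fun c => P c.1 && Q c.2)).length : Int)
        - ((l.filter (fun c => p c.1 && Q c.2)).length : Int)
        - ((l.filter (fun c => P c.1 && q c.2)).length : Int)
        + ((l.filter (fun c => p c.1 && q c.2)).length : Int) := by
  induction l with
  | nil => simp
  | cons c t ih =>
    have hp := hP c (List.mem_cons_self)
    have hq := hQ c (List.mem_cons_self)
    have ih' := ih (fun c hc => hP c (List.mem_cons_of_mem _ hc))
      (fun c hc => hQ c (List.mem_cons_of_mem _ hc))
    simp only [← List.countP_eq_length_filter, List.countP_cons] at ih' ⊢
    by_cases h1 : P c.1 = true <;> by_cases h2 : p c.1 = true <;>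
      by_cases h3 : Q c.2 = true <;> by_cases h4 : q c.2 = true <;>
      first
        | exact absurd (hp (by assumption)) (by assumption)
        | exact absurd (hq (by assumption)) (by assumption)
        | (simp [h1, h2, h3, h4]; omega)

def kA (S : List (Int × Int)) (a b : Int × Int) : Int :=
  ((S.filter (fun c => decide (a.1 ≤ c.1 ∧ c.1 ≤ b.1 ∧ a.2 ≤ c.2 ∧ c.2 ≤ b.2))).length : Int)
def kB (S : List (Int × Int)) (a b : Int × Int) : Int :=
  PySem.List.pyGetD (PySem.List.pyGetD (bGrid S) ((bIdx (bXs S)).getD b.1 0 + 1) []) ((bIdx (bYs S)).getD b.2 0 + 1) 0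
    - PySem.List.pyGetD (PySem.List.pyGetD (bGrid S) ((bIdx (bXs S)).getD a.1 0) []) ((bIdx (bYs S)).getD b.2 0 + 1) 0
    - PySem.List.pyGetD (PySem.List.pyGetD (bGrid S) ((bIdx (bXs S)).getD b.1 0 + 1) []) ((bIdx (bYs S)).getD a.2 0) 0
    + PySem.List.pyGetD (PySem.List.pyGetD (bGrid S) ((bIdx (bXs S)).getD a.1 0) []) ((bIdx (bYs S)).getD a.2 0) 0


def gOf (k : (Int × Int) → (Int × Int) → Int) (a b : Int × Int) : Option Int :=
  if a.1 ≤ b.1 ∧ a.2 ≤ b.2 ∧ a ≠ b then (if k a b ≥ 2 then some (k a b) else none) else none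

theorem kB_eq_kA (S : List (Int × Int)) (a b : Int × Int) (ha : a ∈ S) (hb : b ∈ S)
    (h1 : a.1 ≤ b.1) (h2 : a.2 ≤ b.2) : kB S a b = kA S a b := by
  have hax : a.1 ∈ bXs S := (mem_bXs S _).mpr (List.mem_map.mpr ⟨a, ha, rfl⟩)
  have hbx : b.1 ∈ bXs S := (mem_bXs S _).mpr (List.mem_map.mpr ⟨b, hb, rfl⟩)
  have hay : a.2 ∈ bYs S := (mem_bYs S _).mpr (List.mem_map.mpr ⟨a, ha, rfl⟩)
  have hby : b.2 ∈ bYs S := (mem_bYs S _).mpr (List.mem_map.mpr ⟨b, hb, rfl⟩)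
  have hxnd := bXs_nodup S
  have hynd := bYs_nodup S
  have hxp := bXs_pairwise S
  have hyp := bYs_pairwise S
  have hax' : (bXs S).idxOf a.1 < (bXs S).length := List.idxOf_lt_length_of_mem hax
  have hbx' : (bXs S).idxOf b.1 < (bXs S).length := List.idxOf_lt_length_of_mem hbx
  have hay' : (bYs S).idxOf a.2 < (bYs S).length := List.idxOf_lt_length_of_mem hay
  have hby' : (bYs S).idxOf b.2 < (bYs S).length := List.idxOf_lt_length_of_mem hby
  unfold kB
  rw [bIdx_getD _ hxnd _ hax, bIdx_getD _ hxnd _ hbx,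
    bIdx_getD _ hynd _ hay, bIdx_getD _ hynd _ hby]
  have e1 : ((bXs S).idxOf b.1 : Int) + 1 = (((bXs S).idxOf b.1 + 1 : Nat) : Int) := by push_cast; ring
  have e2 : ((bYs S).idxOf b.2 : Int) + 1 = (((bYs S).idxOf b.2 + 1 : Nat) : Int) := by push_cast; ring
  rw [e1, e2]
  rw [bGrid_get S _ _ (by omega) (by omega), bGrid_get S _ _ (by omega) (by omega),
    bGrid_get S _ _ (by omega) (by omega), bGrid_get S _ _ (by omega) (by omega)]
  have hIE := inclExcl S
    (fun u => decide (u ∈ (bXs S).take ((bXs S).idxOf b.1 + 1)))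
    (fun u => decide (u ∈ (bXs S).take ((bXs S).idxOf a.1)))
    (fun u => decide (u ∈ (bYs S).take ((bYs S).idxOf b.2 + 1)))
    (fun u => decide (u ∈ (bYs S).take ((bYs S).idxOf a.2)))
    (by
      intro c hc hpc
      have hcx : c.1 ∈ bXs S := (mem_bXs S _).mpr (List.mem_map.mpr ⟨c, hc, rfl⟩)
      have hlt := (mem_take_idxOf _ hxp c.1 a.1 hcx hax).1.mp (of_decide_eq_true hpc)
      exact decide_eq_true ((mem_take_idxOf _ hxp c.1 b.1 hcx hbx).2.mpr (by omega)))
    (by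
      intro c hc hqc
      have hcy : c.2 ∈ bYs S := (mem_bYs S _).mpr (List.mem_map.mpr ⟨c, hc, rfl⟩)
      have hlt := (mem_take_idxOf _ hyp c.2 a.2 hcy hay).1.mp (of_decide_eq_true hqc)
      exact decide_eq_true ((mem_take_idxOf _ hyp c.2 b.2 hcy hby).2.mpr (by omega)))
  simp only [cntG]
  rw [← hIE]
  unfold kA
  congr 1
  refine congrArg List.length (List.filter_congr ?_)
  intro c hc
  have hcx : c.1 ∈ bXs S := (mem_bXs S _).mpr (List.mem_map.mpr ⟨c, hc, rfl⟩)
  have hcy : c.2 ∈ bYs S := (mem_bYs S _).mpr (List.mem_map.mpr ⟨c, hc, rfl⟩)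
  have i1 := (mem_take_idxOf _ hxp c.1 b.1 hcx hbx).2
  have i2 := (mem_take_idxOf _ hxp c.1 a.1 hcx hax).1
  have i3 := (mem_take_idxOf _ hyp c.2 b.2 hcy hby).2
  have i4 := (mem_take_idxOf _ hyp c.2 a.2 hcy hay).1
  rw [Bool.eq_iff_iff]
  simp only [Bool.and_eq_true, Bool.not_eq_true', decide_eq_false_iff_not, decide_eq_true_eq]
  rw [i1, i2, i3, i4]
  omega

theorem foldl_match_filterMap {α : Type} (l : List α) (g : α → Option Int)
    (F : PySem.Dict Int Int → Int → PySem.Dict Int Int) (d : PySem.Dict Int Int) :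
    l.foldl (fun d x => match g x with | some k => F d k | none => d) d
      = (l.filterMap g).foldl F d := by
  induction l generalizing d with
  | nil => rfl
  | cons x t ih =>
    simp only [List.foldl_cons, List.filterMap_cons]
    cases g x <;> simp [ih]

theorem foldl_nested_flatMap {α β δ : Type} (l : List α) (f : α → List β) (F : δ → β → δ) (d : δ) :
    l.foldl (fun d a => (f a).foldl F d) d = (l.flatMap f).foldl F d := by
  induction l generalizing d with
  | nil => rfl
  | cons x t ih => simp [List.foldl_append, ih]

theorem interval_count_eq_counter (S : List (Int × Int)) (m : Int) :
    interval_count S m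
      = (PySem.Dict.counter ((PySem.List.sorted2 S Prod.fst Prod.snd false).flatMap
          (fun a => (PySem.List.sorted2 S Prod.fst Prod.snd false).filterMap (gOf (kA S) a)))).items := by
  unfold interval_count
  have hbody : ∀ a : Int × Int, (fun (counts : PySem.Dict Int Int) (b : Int × Int) =>
      if a.1 ≤ b.1 ∧ a.2 ≤ b.2 ∧ a ≠ b then
        let interval := S.filter (fun c => decide (a.1 ≤ c.1 ∧ c.1 ≤ b.1 ∧ a.2 ≤ c.2 ∧ c.2 ≤ b.2))
        let k : Int := interval.length
        if k ≥ 2 then counts.modify k 0 (· + 1) else counts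
      else counts)
      = (fun d b => match gOf (kA S) a b with
         | some k => d.modify k 0 (· + 1)
         | none => d) := by
    intro a; funext d b
    by_cases h1 : a.1 ≤ b.1 ∧ a.2 ≤ b.2 ∧ a ≠ b
    · simp only [gOf, if_pos h1]
      show (if kA S a b ≥ 2 then d.modify (kA S a b) 0 (· + 1) else d) = _
      by_cases h2 : kA S a b ≥ 2 <;> simp [h2]
    · simp only [gOf, if_neg h1]
  simp only [hbody, foldl_match_filterMap, foldl_nested_flatMap]
  rw [PySem.Dict.counter_eq_foldl]

theorem interval_count_alt_eq_counter (S : List (Int × Int)) (m : Int) :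
    interval_count_alt S m
      = (PySem.Dict.counter ((PySem.List.sorted2 S Prod.fst Prod.snd false).flatMap
          (fun a => (PySem.List.sorted2 S Prod.fst Prod.snd false).filterMap (gOf (kB S) a)))).items := by
  unfold interval_count_alt
  have hbody : ∀ a : Int × Int, (fun (counts : PySem.Dict Int Int) (b : Int × Int) =>
      if a.1 ≤ b.1 ∧ a.2 ≤ b.2 ∧ a ≠ b then
        let ib := (bIdx (bXs S)).getD b.1 0 + 1
        let jb := (bIdx (bYs S)).getD b.2 0 + 1
        let k := PySem.List.pyGetD (PySem.List.pyGetD (bGrid S) ib []) jb 0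
               - PySem.List.pyGetD (PySem.List.pyGetD (bGrid S) ((bIdx (bXs S)).getD a.1 0) []) jb 0
               - PySem.List.pyGetD (PySem.List.pyGetD (bGrid S) ib []) ((bIdx (bYs S)).getD a.2 0) 0
               + PySem.List.pyGetD (PySem.List.pyGetD (bGrid S) ((bIdx (bXs S)).getD a.1 0) []) ((bIdx (bYs S)).getD a.2 0) 0
        if k ≥ 2 then counts.insert k (counts.getD k 0 + 1) else counts
      else counts)
      = (fun d b => match gOf (kB S) a b with
         | some k => d.insert k (d.getD k 0 + 1)
         | none => d) := by
    intro a; funext d b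
    by_cases h1 : a.1 ≤ b.1 ∧ a.2 ≤ b.2 ∧ a ≠ b
    · simp only [gOf, if_pos h1]
      show (if kB S a b ≥ 2 then d.insert (kB S a b) (d.getD (kB S a b) 0 + 1) else d) = _
      by_cases h2 : kB S a b ≥ 2 <;> simp [h2]
    · simp only [gOf, if_neg h1]
  simp only [hbody, foldl_match_filterMap, foldl_nested_flatMap]
  rw [PySem.Dict.foldl_insert_getD_add_one_eq_counter]

theorem gOf_eq (S : List (Int × Int)) (a b : Int × Int) (ha : a ∈ S) (hb : b ∈ S) :
    gOf (kA S) a b = gOf (kB S) a b := by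
  unfold gOf
  by_cases h : a.1 ≤ b.1 ∧ a.2 ≤ b.2 ∧ a ≠ b
  · rw [kB_eq_kA S a b ha hb h.1 h.2.1]
  · simp [h]

-- ===== VERDICT (by name: the statement is the Claim_ definition above) =====
theorem interval_count_spec : Claim_equal_interval_count := by
  unfold Claim_equal_interval_count
  intro S m _
  unfold Spec_interval_count
  rw [interval_count_eq_counter S m, interval_count_alt_eq_counter S m]
  congr 1
  apply congrArg
  apply List.flatMap_congr
  intro a ha
  apply List.filterMap_congr
  intro b hb
  exact gOf_eq S a b ((PySem.List.sorted2_perm S Prod.fst Prod.snd false).mem_iff.mp ha)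
    ((PySem.List.sorted2_perm S Prod.fst Prod.snd false).mem_iff.mp hb)
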